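-- pv_equiv track=rewrite | github.com/mindspore-ai/mindquantum | hackathon/hackathon2024/qsim/solution.py | get_ob_par_pos
-- ===== SOURCE A (Python) =====
-- def get_ob_par_pos(coeff_observables,par_child):
--     full_ob_par_pos = []
--     for i, [coeff, one_obser] in enumerate(coeff_observables):
--
--         every_ob_parent = []
--         for parent, children in par_child:
--             if i in children:
--                 every_ob_parent.append([parent, children.index(i)])
--         full_ob_par_pos.append(every_ob_parent)
--     return full_ob_par_pos
-- ===== SOURCE B (Python) =====
-- def get_ob_par_pos(coeff_observables, par_child):
--     # Invert the loop nesting: one pass over par_child builds an index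
--     # child -> list of [parent, first_position]; then read rows off the index.
--     index = {}
--     for parent, children in par_child:
--         seen = set()
--         for pos, c in enumerate(children):
--             if c not in seen:
--                 seen.add(c)
--                 index.setdefault(c, []).append([parent, pos])
--     return [index.get(i, []) for i in range(len(coeff_observables))]
-- ===== Notes on version B (the rewrite author's own statement) =====
-- stated objective: faster
-- what changed: Inverts the loop nesting: instead of scanning all of par_child (with an 'in' scan plus a .index scan per hit) once per observable, B makes a single pass over par_child building a child->[[parent,pos],...] index with a per-pair seen set, then reads each observable's row off the index.
import Mathlib
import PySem

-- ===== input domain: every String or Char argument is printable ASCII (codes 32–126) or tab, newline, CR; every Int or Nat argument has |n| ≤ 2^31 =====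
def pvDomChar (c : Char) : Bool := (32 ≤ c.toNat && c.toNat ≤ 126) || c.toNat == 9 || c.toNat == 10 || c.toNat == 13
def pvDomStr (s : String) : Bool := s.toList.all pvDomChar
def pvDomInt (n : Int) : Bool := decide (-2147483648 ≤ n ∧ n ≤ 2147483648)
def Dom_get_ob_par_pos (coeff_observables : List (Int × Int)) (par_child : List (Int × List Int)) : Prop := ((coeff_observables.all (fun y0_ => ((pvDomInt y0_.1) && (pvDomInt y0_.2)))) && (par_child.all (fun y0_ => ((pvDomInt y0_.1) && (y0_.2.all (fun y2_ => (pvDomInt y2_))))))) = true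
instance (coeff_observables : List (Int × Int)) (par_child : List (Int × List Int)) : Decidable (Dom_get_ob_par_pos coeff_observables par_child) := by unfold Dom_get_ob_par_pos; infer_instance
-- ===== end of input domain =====

-- B inverts the loop nesting: one pass over par_child builds a child -> [[parent,pos],…] index, then rows are read off the index.


-- ===== PORT A =====
-- literal port: outer loop over enumerate(coeff_observables), inner scan of par_child with
-- `i in children` and `children.index(i)` (index? is guarded by the membership test, so getD 0 is never taken)
def get_ob_par_pos (coeff_observables : List (Int × Int)) (par_child : List (Int × List Int)) : List (List (List Int)) :=
  (PySem.List.enumerate coeff_observables 0).foldl (fun full_ob_par_pos pr =>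
    full_ob_par_pos ++ [par_child.foldl (fun every_ob_parent q =>
      if pr.1 ∈ q.2 then
        every_ob_parent ++ [[q.1, (((PySem.List.index? q.2 pr.1).getD 0 : Nat) : Int)]]
      else every_ob_parent) []]) []

-- ===== PORT B =====
-- one enumerate step of Source B's inner loop: skip already-seen children, else record [parent, pos]
def pvStepB (parent : Int) (st : PySem.Dict Int (List (List Int)) × PySem.Set Int) (pr : Int × Int) :
    PySem.Dict Int (List (List Int)) × PySem.Set Int :=
  if pr.2 ∈ st.2 then st
  else (PySem.Dict.modify st.1 pr.2 [] (· ++ [[parent, pr.1]]), PySem.Set.add st.2 pr.2)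

def get_ob_par_pos_alt (coeff_observables : List (Int × Int)) (par_child : List (Int × List Int)) : List (List (List Int)) :=
  let index := par_child.foldl (fun index q =>
    ((PySem.List.enumerate q.2 0).foldl (pvStepB q.1) (index, PySem.Set.empty)).1) PySem.Dict.empty
  (PySem.List.pyRange 0 coeff_observables.length 1).map (fun i => PySem.Dict.getD index i [])

-- ===== PRECONDITION & SPEC =====
def Spec_get_ob_par_pos (coeff_observables : List (Int × Int)) (par_child : List (Int × List Int)) (out : List (List (List Int))) : Prop := out = get_ob_par_pos_alt coeff_observables par_child
instance (coeff_observables : List (Int × Int)) (par_child : List (Int × List Int)) (out : List (List (List Int))) : Decidable (Spec_get_ob_par_pos coeff_observables par_child out) := by unfold Spec_get_ob_par_pos; infer_instance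

-- ===== CLAIM (what is proved, stated in full; the proofs are below) =====
def Claim_equal_get_ob_par_pos : Prop := ∀ (coeff_observables : List (Int × Int)) (par_child : List (Int × List Int)), Dom_get_ob_par_pos coeff_observables par_child → Spec_get_ob_par_pos coeff_observables par_child (get_ob_par_pos coeff_observables par_child)

-- ===== LEMMAS AND PROOFS =====

-- the row both programs produce for observable index i, as a flat map over par_child
def pvRow (i : Int) (par_child : List (Int × List Int)) : List (List Int) :=
  par_child.flatMap (fun q => if i ∈ q.2 then [[q.1, ((q.2.idxOf i : Nat) : Int)]] else [])

lemma pv_idxOf? {l : List Int} {i : Int} (h : i ∈ l) : (l.idxOf? i) = some (l.idxOf i) := by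
  induction l with
  | nil => simp at h
  | cons c rest ih =>
    by_cases hc : c = i
    · simp [List.idxOf?_cons, hc]
    · rcases List.mem_cons.mp h with h1 | h2
      · exact absurd h1.symm hc
      · simp [List.idxOf?_cons, hc, ih h2]

lemma pv_index?_getD {l : List Int} {i : Int} (h : i ∈ l) :
    (((PySem.List.index? l i).getD 0 : Nat) : Int) = ((l.idxOf i : Nat) : Int) := by
  rw [PySem.List.index?_eq_idxOf?, pv_idxOf? h]; simp

lemma pvRowA (i : Int) (pc : List (Int × List Int)) (acc : List (List Int)) :
    pc.foldl (fun every q =>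
      if i ∈ q.2 then every ++ [[q.1, (((PySem.List.index? q.2 i).getD 0 : Nat) : Int)]]
      else every) acc = acc ++ pvRow i pc := by
  induction pc generalizing acc with
  | nil => simp [pvRow]
  | cons q rest ih =>
    simp only [List.foldl_cons, pvRow, List.flatMap_cons]
    by_cases hm : i ∈ q.2
    · rw [if_pos hm, ih, pv_index?_getD hm]
      simp [pvRow, hm]
    · rw [if_neg hm, ih]
      simp [pvRow, hm]

lemma pvInner_getD (p : Int) (ch : List Int) (s : Int) (d : PySem.Dict Int (List (List Int)))
    (seen : PySem.Set Int) (i : Int) :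
    (((PySem.List.enumerate ch s).foldl (pvStepB p) (d, seen)).1).getD i [] =
      if i ∈ ch ∧ i ∉ seen then d.getD i [] ++ [[p, s + ((ch.idxOf i : Nat) : Int)]]
      else d.getD i [] := by
  induction ch generalizing s d seen with
  | nil => simp [PySem.List.enumerate_nil]
  | cons c rest ih =>
    rw [PySem.List.enumerate_cons, List.foldl_cons]
    by_cases hcs : c ∈ seen
    · rw [show pvStepB p (d, seen) (s, c) = (d, seen) by simp [pvStepB, hcs]]
      rw [ih]
      by_cases hic : i = c
      · subst hic; simp [hcs]
      · simp only [List.mem_cons, hic, false_or, List.idxOf_cons,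
          show (c == i) = false by simp [Ne.symm hic]]
        by_cases hr : i ∈ rest ∧ i ∉ seen
        · rw [if_pos hr, if_pos ⟨hr.1, hr.2⟩]
          simp only [Bool.cond_false]
          push_cast
          rw [show s + 1 + ((List.idxOf i rest : Nat) : Int)
                = s + (((List.idxOf i rest : Nat) : Int) + 1) from by omega]
        · rw [if_neg hr, if_neg (by tauto)]
    · rw [show pvStepB p (d, seen) (s, c)
            = (PySem.Dict.modify d c [] (· ++ [[p, s]]), PySem.Set.add seen c) by
          simp [pvStepB, hcs]]
      rw [ih]
      by_cases hic : i = c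
      · subst hic
        rw [if_neg (by simp [PySem.Set.mem_add])]
        rw [if_pos ⟨List.mem_cons_self, hcs⟩]
        rw [PySem.Dict.getD_modify_self]
        simp
      · rw [PySem.Dict.getD_modify_of_ne _ _ _ hic]
        have hmadd : (i ∈ PySem.Set.add seen c) ↔ i ∈ seen := by
          simp [PySem.Set.mem_add, hic]
        simp only [List.mem_cons, hic, false_or, List.idxOf_cons,
          show (c == i) = false by simp [Ne.symm hic], hmadd]
        by_cases hr : i ∈ rest ∧ i ∉ seen
        · rw [if_pos hr, if_pos hr]
          simp only [Bool.cond_false]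
          push_cast
          rw [show s + 1 + ((List.idxOf i rest : Nat) : Int)
                = s + (((List.idxOf i rest : Nat) : Int) + 1) from by omega]
        · rw [if_neg hr, if_neg hr]

lemma pvBuild_getD (pc : List (Int × List Int)) (d : PySem.Dict Int (List (List Int))) (i : Int) :
    (pc.foldl (fun index q =>
      ((PySem.List.enumerate q.2 0).foldl (pvStepB q.1) (index, PySem.Set.empty)).1) d).getD i []
      = d.getD i [] ++ pvRow i pc := by
  induction pc generalizing d with
  | nil => simp [pvRow]
  | cons q rest ih =>
    rw [List.foldl_cons, ih]
    rw [pvInner_getD q.1 q.2 0 d PySem.Set.empty i]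
    by_cases hm : i ∈ q.2
    · rw [if_pos ⟨hm, by simp [PySem.Set.empty]⟩]
      simp [pvRow, hm]
    · rw [if_neg (by tauto)]
      simp [pvRow, hm]

-- ===== VERDICT (by name: the statement is the Claim_ definition above) =====
lemma pvA_eq (cobs : List (Int × Int)) (pc : List (Int × List Int)) :
    get_ob_par_pos cobs pc
      = (PySem.List.pyRange 0 cobs.length 1).map (fun i => pvRow i pc) := by
  unfold get_ob_par_pos
  have h1 : (PySem.List.enumerate cobs 0).foldl (fun full pr =>
      full ++ [pc.foldl (fun every q =>
        if pr.1 ∈ q.2 then every ++ [[q.1, (((PySem.List.index? q.2 pr.1).getD 0 : Nat) : Int)]]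
        else every) []]) []
      = (PySem.List.enumerate cobs 0).map (fun pr => pvRow pr.1 pc) := by
    rw [PySem.List.foldl_append_singleton_eq_map]
    exact List.map_congr_left (fun pr _ => by rw [pvRowA]; simp)
  rw [h1, show (fun pr : Int × (Int × Int) => pvRow pr.1 pc)
        = (fun i => pvRow i pc) ∘ (fun pr : Int × (Int × Int) => pr.1) from rfl,
      ← List.map_map, PySem.List.map_fst_enumerate]
  simp

theorem get_ob_par_pos_spec : Claim_equal_get_ob_par_pos := by
  intro cobs pc _
  unfold Spec_get_ob_par_pos get_ob_par_pos_alt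
  rw [pvA_eq]
  refine List.map_congr_left (fun i _ => ?_)
  rw [pvBuild_getD]
  simp [PySem.Dict.empty, PySem.Dict.getD, PySem.Dict.get?]
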